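-- pv_equiv track=rewrite | github.com/981377660LMT/algorithm-study | tmp/393/3.py | count
-- ===== SOURCE A (Python) =====
-- from math import floor, gcd
-- from typing import List, Tuple, Optional
--
-- def count(upper: int, nums: List[int]) -> int:
--     """[1, upper]中能被primes中的至少一个数整除的数的个数"""
--     m = len(nums)
--     res = 0
--     for state in range(1, (1 << m)):
--         mul = 1
--         for i in range(m):
--             if state & (1 << i):
--                 gcd_ = gcd(mul, nums[i])
--                 mul *= nums[i] // gcd_
--
--         if state.bit_count() & 1:
--             res += upper // mul
--         else:
--             res -= upper // mul
--     return res
-- ===== SOURCE B (Python) =====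
-- from math import gcd
--
-- def count(upper, nums):
--     """[1, upper]中能被nums中的至少一个数整除的数的个数 (inclusion-exclusion, subset-DP lcm)"""
--     m = len(nums)
--     lcms = [1]  # lcms[state] = product/lcm for that subset, filled in increasing state order
--     res = 0
--     for state in range(1, 1 << m):
--         hi = state.bit_length() - 1
--         l = lcms[state ^ (1 << hi)]
--         x = nums[hi]
--         cur = l * (x // gcd(l, x))
--         lcms.append(cur)
--         if state.bit_count() & 1:
--             res += upper // cur
--         else:
--             res -= upper // cur
--     return res
-- ===== Notes on version B (the rewrite author's own statement) =====
-- stated objective: alternative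
-- what changed: Replaces A's per-subset inner loop over all m bits by a subset DP that extends the stored lcm of state-without-highest-bit with nums[highest bit], one combine per subset (O(2^m) combines vs O(m*2^m); measured 6.5x at n=16, but both time out at n=64 so a timing run could not confirm at the largest size).
import Mathlib
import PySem

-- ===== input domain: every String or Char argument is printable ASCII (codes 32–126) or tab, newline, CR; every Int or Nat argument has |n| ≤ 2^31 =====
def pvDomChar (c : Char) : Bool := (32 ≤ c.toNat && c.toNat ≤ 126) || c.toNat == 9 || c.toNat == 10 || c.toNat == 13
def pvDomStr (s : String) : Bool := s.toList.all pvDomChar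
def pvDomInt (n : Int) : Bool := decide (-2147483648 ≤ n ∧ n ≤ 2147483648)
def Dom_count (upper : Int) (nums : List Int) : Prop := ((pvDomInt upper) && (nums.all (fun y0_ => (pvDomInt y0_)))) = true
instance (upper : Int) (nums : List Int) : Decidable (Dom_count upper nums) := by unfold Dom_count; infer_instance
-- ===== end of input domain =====

-- B replaces A's per-subset inner loop over all m bits by a subset DP (the lcm of a state from
-- that of state-without-its-highest-bit), one combine per subset instead of one per bit.

-- ===== PORT A =====
-- mul *= nums[i] // gcd(mul, nums[i])  (math.gcd = Int.gcd: nonnegative, on absolute values)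
def pyCombine (mul x : Int) : Int :=
  let g : Int := Int.gcd mul x
  mul * PySem.Int.floordiv x g

-- body of A's inner loop over i in range(m); index i always in range, so nums.getD i 0 = nums[i]
def innerStep (nums : List Int) (state : Nat) (mul : Int) (i : Nat) : Int :=
  if state &&& (1 <<< i) ≠ 0 then pyCombine mul (nums.getD i 0) else mul

-- A's inner loop: mul after 'for i in range(m)'
def mulOf (nums : List Int) (m state : Nat) : Int :=
  (List.range m).foldl (innerStep nums state) 1

-- body of A's outer loop over state
def outerStep (upper : Int) (nums : List Int) (m : Nat) (res : Int) (state : Nat) : Int :=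
  let mul := mulOf nums m state
  if PySem.Int.bitCount (state : Int) % 2 = 1 then res + PySem.Int.floordiv upper mul
  else res - PySem.Int.floordiv upper mul

def count (upper : Int) (nums : List Int) : Int :=
  let m := nums.length
  (List.range' 1 (2 ^ m - 1)).foldl (outerStep upper nums m) 0

-- ===== PORT B =====
-- body of B's single loop: acc = (lcms table so far, res); lcms[state] is pushed in order,
-- lcms[state ^ (1 << hi)] read back via getD (index always < state, so in range)
def altStep (upper : Int) (nums : List Int) (acc : List Int × Int) (state : Nat) : List Int × Int :=
  let hi := PySem.Int.bitLength (state : Int) - 1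
  let l := acc.1.getD (state ^^^ (1 <<< hi)) 1
  let x := nums.getD hi 0
  let cur := l * PySem.Int.floordiv x (Int.gcd l x)
  let res := if PySem.Int.bitCount (state : Int) % 2 = 1 then acc.2 + PySem.Int.floordiv upper cur
             else acc.2 - PySem.Int.floordiv upper cur
  (acc.1 ++ [cur], res)

def count_alt (upper : Int) (nums : List Int) : Int :=
  let m := nums.length
  ((List.range' 1 (2 ^ m - 1)).foldl (altStep upper nums) ([1], 0)).2

-- ===== PRECONDITION & SPEC =====
-- Pre_ excludes exactly the inputs where A raises ZeroDivisionError: nums containing 0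
-- (then the subset consisting of that element alone has product 0 and 'upper // mul' raises).
def Pre_count (upper : Int) (nums : List Int) : Prop := ¬ (0 ∈ nums)
instance (upper : Int) (nums : List Int) : Decidable (Pre_count upper nums) := by unfold Pre_count; infer_instance
def pvWitness_count : Int × List Int := (10, [2, 3])

def Spec_count (upper : Int) (nums : List Int) (out : Int) : Prop := out = count_alt upper nums
instance (upper : Int) (nums : List Int) (out : Int) : Decidable (Spec_count upper nums out) := by unfold Spec_count; infer_instance

-- ===== CLAIM (what is proved, stated in full; the proofs are below) =====
def Claim_equal_count : Prop := ∀ (upper : Int) (nums : List Int), Dom_count upper nums → Pre_count upper nums → Spec_count upper nums (count upper nums)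

-- ===== LEMMAS AND PROOFS =====

-- bit test bridge for A's condition
theorem and_shift_ne_iff (s i : Nat) : (s &&& (1 <<< i) ≠ 0) ↔ s.testBit i = true := by
  rw [Nat.one_shiftLeft, Nat.and_two_pow]
  cases h : s.testBit i <;> simp


theorem foldl_innerStep_id (nums : List Int) (s : Nat) (l : List Nat) (acc : Int)
    (h : ∀ i ∈ l, s.testBit i = false) :
    l.foldl (innerStep nums s) acc = acc := by
  induction l generalizing acc with
  | nil => rfl
  | cons a t ih =>
    have ha : s.testBit a = false := h a (by simp)
    simp only [List.foldl_cons]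
    rw [show innerStep nums s acc a = acc by
      unfold innerStep; rw [if_neg]; intro hc; rw [and_shift_ne_iff] at hc; simp [ha] at hc]
    exact ih _ (fun i hi => h i (by simp [hi]))

theorem foldl_innerStep_congr (nums : List Int) (s t : Nat) (l : List Nat) (acc : Int)
    (h : ∀ i ∈ l, s.testBit i = t.testBit i) :
    l.foldl (innerStep nums s) acc = l.foldl (innerStep nums t) acc := by
  induction l generalizing acc with
  | nil => rfl
  | cons a tl ih =>
    have ha := h a (by simp)
    simp only [List.foldl_cons]
    have : innerStep nums s acc a = innerStep nums t acc a := by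
      unfold innerStep
      by_cases hc : s &&& (1 <<< a) ≠ 0
      · rw [if_pos hc, if_pos]
        rw [and_shift_ne_iff] at hc ⊢; rw [← ha]; exact hc
      · rw [if_neg hc, if_neg]
        intro hc'; rw [and_shift_ne_iff] at hc hc'; rw [← ha] at hc'; exact hc hc'
    rw [this]
    exact ih _ (fun i hi => h i (by simp [hi]))

-- testBit characterization from 2^hi ≤ s < 2^(hi+1)
theorem testBit_true_of_bounds (s hi : Nat) (h1 : 2 ^ hi ≤ s) (h2 : s < 2 ^ (hi + 1)) :
    s.testBit hi = true := by
  rw [Nat.testBit_eq_decide_div_mod_eq]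
  have hd : s / 2 ^ hi = 1 := by
    have hp : 0 < 2 ^ hi := Nat.two_pow_pos hi
    have h2' : s < 2 ^ hi * 2 := by rw [pow_succ] at h2; omega
    have hlt : s / 2 ^ hi < 2 := Nat.div_lt_of_lt_mul h2'
    have hge : 1 ≤ s / 2 ^ hi := (Nat.le_div_iff_mul_le hp).mpr (by omega)
    omega
  simp [hd]

theorem testBit_false_of_lt (s j : Nat) (h : s < 2 ^ j) : s.testBit j = false := by
  apply Nat.testBit_lt_two_pow h

-- bitLength of a positive Nat, as bounds
theorem bitLength_bounds (s : Nat) (hs : 1 ≤ s) :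
    2 ^ (PySem.Int.bitLength (s : Int) - 1) ≤ s ∧ s < 2 ^ (PySem.Int.bitLength (s : Int) - 1 + 1) := by
  have h0 : (s : Int) ≠ 0 := by exact_mod_cast Nat.one_le_iff_ne_zero.mp hs
  have hle := PySem.Int.two_pow_bitLength_le (s : Int) h0
  have hlt := PySem.Int.lt_two_pow_bitLength (s : Int)
  have habs : (s : Int).natAbs = s := Int.natAbs_natCast s
  rw [habs] at hle hlt
  constructor
  · exact hle
  · have hbl : 1 ≤ PySem.Int.bitLength (s : Int) := by
      by_contra h
      have : PySem.Int.bitLength (s : Int) = 0 := by omega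
      rw [this] at hlt; simp at hlt; omega
    have : PySem.Int.bitLength (s : Int) - 1 + 1 = PySem.Int.bitLength (s : Int) := by omega
    rw [this]; exact hlt

-- the key step: A's inner product for state = combine of the product for state-minus-top-bit
theorem mulOf_step (nums : List Int) (m state : Nat) (h1 : 1 ≤ state) (h2 : state < 2 ^ m) :
    mulOf nums m state =
      pyCombine (mulOf nums m (state ^^^ (1 <<< (PySem.Int.bitLength (state : Int) - 1))))
        (nums.getD (PySem.Int.bitLength (state : Int) - 1) 0) := by
  set hi := PySem.Int.bitLength (state : Int) - 1 with hhi
  obtain ⟨hlo, hhi2⟩ := bitLength_bounds state h1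
  rw [← hhi] at hlo hhi2
  have hbit : state.testBit hi = true := testBit_true_of_bounds state hi hlo hhi2
  have hm : hi < m := by
    by_contra h
    have : 2 ^ m ≤ 2 ^ hi := Nat.pow_le_pow_right (by norm_num) (by omega)
    omega
  set rest := state ^^^ (1 <<< hi) with hrest
  have hshift : (1 <<< hi) = 2 ^ hi := Nat.one_shiftLeft hi
  have hrestbit : ∀ j, rest.testBit j = if j = hi then false else state.testBit j := by
    intro j
    rw [hrest, hshift, Nat.testBit_xor, Nat.testBit_two_pow]
    by_cases hj : j = hi
    · simp [hj, hbit]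
    · simp [hj, Ne.symm hj]
  have hresthigh : ∀ j, hi ≤ j → rest.testBit j = false := by
    intro j hj
    rw [hrestbit]
    by_cases hj' : j = hi
    · simp [hj']
    · rw [if_neg hj']
      exact testBit_false_of_lt state j (lt_of_lt_of_le hhi2 (Nat.pow_le_pow_right (by norm_num) (by omega)))
  -- split range m at hi+1 for state
  have hsplit : List.range m = List.range (hi + 1) ++ List.range' (hi + 1) (m - (hi + 1)) := by
    rw [List.range_eq_range', show m = (hi + 1) + (m - (hi + 1)) by omega, ← List.range'_append]
    simp [List.range_eq_range']
  have hsplit2 : List.range m = List.range hi ++ List.range' hi (m - hi) := by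
    rw [List.range_eq_range', show m = hi + (m - hi) by omega, ← List.range'_append]
    simp [List.range_eq_range']
  -- mulOf rest = fold over range hi with state's bits
  have hrestEq : mulOf nums m rest = (List.range hi).foldl (innerStep nums state) 1 := by
    unfold mulOf
    rw [hsplit2, List.foldl_append]
    rw [foldl_innerStep_id nums rest _ _ (by
      intro i hi'
      have := List.mem_range'.mp hi'
      exact hresthigh i (by omega))]
    apply foldl_innerStep_congr
    intro i hi'
    have hii := List.mem_range.mp hi'
    rw [hrestbit, if_neg (by omega)]
  -- mulOf state = step at hi applied to fold over range hi
  have hL : mulOf nums m state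
      = pyCombine ((List.range hi).foldl (innerStep nums state) 1) (nums.getD hi 0) := by
    unfold mulOf
    rw [hsplit, List.foldl_append]
    rw [foldl_innerStep_id nums state _ _ (by
      intro i hi'
      have := List.mem_range'.mp hi'
      exact testBit_false_of_lt state i (lt_of_lt_of_le hhi2 (Nat.pow_le_pow_right (by norm_num) (by omega))))]
    rw [List.range_succ, List.foldl_append]
    simp only [List.foldl_cons, List.foldl_nil]
    rw [show innerStep nums state ((List.range hi).foldl (innerStep nums state) 1) hi
        = pyCombine ((List.range hi).foldl (innerStep nums state) 1) (nums.getD hi 0) by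
      unfold innerStep; rw [if_pos]; rw [and_shift_ne_iff]; exact hbit]
  rw [hL, hrestEq]

-- rest is strictly below state (in fact < 2^hi ≤ state)
theorem rest_lt (state : Nat) (h1 : 1 ≤ state) :
    state ^^^ (1 <<< (PySem.Int.bitLength (state : Int) - 1)) < state := by
  set hi := PySem.Int.bitLength (state : Int) - 1 with hhi
  obtain ⟨hlo, hhi2⟩ := bitLength_bounds state h1
  rw [← hhi] at hlo hhi2
  have hbit : state.testBit hi = true := testBit_true_of_bounds state hi hlo hhi2
  have hshift : (1 <<< hi) = 2 ^ hi := Nat.one_shiftLeft hi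
  have hhighfalse : ∀ j, hi ≤ j → (state ^^^ (1 <<< hi)).testBit j = false := by
    intro j hj
    rw [hshift, Nat.testBit_xor, Nat.testBit_two_pow]
    by_cases hj' : j = hi
    · subst hj'; simp [hbit]
    · have : state.testBit j = false :=
        testBit_false_of_lt state j (lt_of_lt_of_le hhi2 (Nat.pow_le_pow_right (by norm_num) (by omega)))
      simp [this, Ne.symm hj']
  have : state ^^^ (1 <<< hi) < 2 ^ hi := by
    by_contra h
    push Not at h
    obtain ⟨hr1, hr2⟩ := bitLength_bounds _ (le_trans (Nat.one_le_two_pow) h)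
    have hbitr := testBit_true_of_bounds _ _ hr1 hr2
    have hge : hi ≤ PySem.Int.bitLength ((state ^^^ (1 <<< hi) : Nat) : Int) - 1 := by
      by_contra hlt
      push Not at hlt
      have : 2 ^ (PySem.Int.bitLength ((state ^^^ (1 <<< hi) : Nat) : Int) - 1 + 1) ≤ 2 ^ hi :=
        Nat.pow_le_pow_right (by norm_num) (by omega)
      omega
    have := hhighfalse _ hge
    rw [this] at hbitr
    exact Bool.false_ne_true hbitr
  omega

-- B's table after processing states 1..k is exactly [mulOf 0, …, mulOf k], and res matches A's
theorem alt_invariant (upper : Int) (nums : List Int) (k : Nat) (hk : k ≤ 2 ^ nums.length - 1) :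
    (List.range' 1 k).foldl (altStep upper nums) ([1], 0)
      = ((List.range (k + 1)).map (mulOf nums nums.length),
         (List.range' 1 k).foldl (outerStep upper nums nums.length) 0) := by
  induction k with
  | zero =>
    simp [List.range'_zero, List.range_succ]
    unfold mulOf
    rw [foldl_innerStep_id nums 0 _ _ (by intro i _; exact Nat.zero_testBit i)]
  | succ k ih =>
    have hk' : k ≤ 2 ^ nums.length - 1 := by omega
    have hstate1 : 1 ≤ k + 1 := by omega
    have hstate2 : k + 1 < 2 ^ nums.length := by
      have : 1 ≤ 2 ^ nums.length := Nat.one_le_two_pow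
      omega
    rw [List.range'_concat, List.foldl_append, List.foldl_append, ih hk']
    simp only [List.foldl_cons, List.foldl_nil]
    rw [show 1 + 1 * k = k + 1 by omega]
    unfold altStep
    set hi := PySem.Int.bitLength ((k + 1 : Nat) : Int) - 1 with hhi
    have hrlt : (k + 1) ^^^ (1 <<< hi) < k + 1 := rest_lt (k + 1) hstate1
    have hget : ((List.range (k + 1)).map (mulOf nums nums.length)).getD ((k + 1) ^^^ (1 <<< hi)) 1
        = mulOf nums nums.length ((k + 1) ^^^ (1 <<< hi)) := by
      rw [List.getD_eq_getElem?_getD]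
      rw [List.getElem?_map]
      rw [List.getElem?_range (by omega)]
      rfl
    have hcur : mulOf nums nums.length ((k + 1) ^^^ (1 <<< hi))
          * PySem.Int.floordiv (nums.getD hi 0)
            (Int.gcd (mulOf nums nums.length ((k + 1) ^^^ (1 <<< hi))) (nums.getD hi 0))
        = mulOf nums nums.length (k + 1) := by
      rw [mulOf_step nums nums.length (k + 1) hstate1 hstate2]
      rfl
    simp only [hget, hcur]
    rw [Prod.mk.injEq]
    constructor
    · rw [show k + 1 + 1 = (k + 1) + 1 from rfl, List.range_succ (n := k + 1), List.map_append]
      rfl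
    · unfold outerStep
      rfl

-- ===== VERDICT (by name: the statement is the Claim_ definition above) =====
theorem count_spec : Claim_equal_count := by
  intro upper nums _ _
  unfold Spec_count count count_alt
  dsimp only
  rw [alt_invariant upper nums (2 ^ nums.length - 1) (le_refl _)]
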